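-- pv_equiv track=rewrite | github.com/argelasidera/AdventOfCode2023-Python | day1-trebuchet/part2.py | get_text_value
-- ===== SOURCE A (Python) =====
-- def get_text_value(substring: str, is_start: bool) -> int:
--     number_dict = {
--         "one": 1,
--         "two": 2,
--         "three": 3,
--         "four": 4,
--         "five": 5,
--         "six": 6,
--         "seven": 7,
--         "eight": 8,
--         "nine": 9,
--     }
--
--     if is_start:
--         for i in [3, 4, 5]:
--             if substring[:i] in number_dict:
--                 return number_dict[substring[:i]]
--     else:
--         for i in [-3, -4, -5]:
--             if substring[i:] in number_dict:
--                 return number_dict[substring[i:]]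
--
--     return -1
-- ===== SOURCE B (Python) =====
-- NUMBER_WORDS = [
--     ("one", 1), ("two", 2), ("three", 3), ("four", 4), ("five", 5),
--     ("six", 6), ("seven", 7), ("eight", 8), ("nine", 9),
-- ]
--
--
-- def get_text_value(substring: str, is_start: bool) -> int:
--     for word, value in NUMBER_WORDS:
--         if substring.startswith(word) if is_start else substring.endswith(word):
--             return value
--     return -1
-- ===== Notes on version B (the rewrite author's own statement) =====
-- stated objective: idiomatic
-- what changed: B scans the nine (word, value) pairs once with startswith/endswith instead of slicing three fixed prefix/suffix lengths and testing dict membership; correct because no digit word is a prefix or suffix of another.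
import Mathlib
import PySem

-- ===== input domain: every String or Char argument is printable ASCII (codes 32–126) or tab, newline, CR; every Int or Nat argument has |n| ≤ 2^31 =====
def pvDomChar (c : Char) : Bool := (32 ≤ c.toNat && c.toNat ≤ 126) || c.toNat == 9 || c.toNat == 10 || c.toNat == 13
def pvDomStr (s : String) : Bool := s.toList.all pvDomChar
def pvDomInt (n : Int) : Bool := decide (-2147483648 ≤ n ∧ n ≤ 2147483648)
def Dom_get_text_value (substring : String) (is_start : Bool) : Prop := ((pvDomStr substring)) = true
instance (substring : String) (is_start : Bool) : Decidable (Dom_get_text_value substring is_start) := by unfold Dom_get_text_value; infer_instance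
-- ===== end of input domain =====

-- B scans the nine (word, value) pairs once with startswith/endswith instead of A's
-- fixed-length slicing plus dict membership; same return value on every input (idiomatic rewrite).

-- ===== PORT A =====
-- the dict literal `number_dict`
def pvNumberDict : PySem.Dict String Int :=
  ((((((((PySem.Dict.empty.insert "one" 1).insert "two" 2).insert "three" 3).insert
    "four" 4).insert "five" 5).insert "six" 6).insert "seven" 7).insert "eight" 8).insert "nine" 9

-- `for i in [3, 4, 5]: if substring[:i] in number_dict: return number_dict[substring[:i]]`
def pvAStartLoop (substring : String) : List Int → Option Int
  | [] => none
  | i :: rest =>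
      match pvNumberDict.get? (PySem.Str.slice substring none (some i)) with
      | some v => some v
      | none => pvAStartLoop substring rest

-- `for i in [-3, -4, -5]: if substring[i:] in number_dict: return number_dict[substring[i:]]`
def pvAEndLoop (substring : String) : List Int → Option Int
  | [] => none
  | i :: rest =>
      match pvNumberDict.get? (PySem.Str.slice substring (some i) none) with
      | some v => some v
      | none => pvAEndLoop substring rest

def get_text_value (substring : String) (is_start : Bool) : Int :=
  if is_start then (pvAStartLoop substring [3, 4, 5]).getD (-1)
  else (pvAEndLoop substring [-3, -4, -5]).getD (-1)

-- ===== PORT B =====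
def pvNumberWords : List (String × Int) :=
  [("one", 1), ("two", 2), ("three", 3), ("four", 4), ("five", 5),
   ("six", 6), ("seven", 7), ("eight", 8), ("nine", 9)]

-- `for word, value in NUMBER_WORDS: if <startswith/endswith>: return value` / `return -1`
def pvBScan (substring : String) (is_start : Bool) : List (String × Int) → Int
  | [] => -1
  | (w, v) :: rest =>
      if (if is_start then PySem.Str.startswith substring w else PySem.Str.endswith substring w)
      then v else pvBScan substring is_start rest

def get_text_value_alt (substring : String) (is_start : Bool) : Int :=
  pvBScan substring is_start pvNumberWords

-- ===== PRECONDITION & SPEC =====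
def Spec_get_text_value (substring : String) (is_start : Bool) (out : Int) : Prop := out = get_text_value_alt substring is_start
instance (substring : String) (is_start : Bool) (out : Int) : Decidable (Spec_get_text_value substring is_start out) := by unfold Spec_get_text_value; infer_instance

-- ===== CLAIM (what is proved, stated in full; the proofs are below) =====
def Claim_equal_get_text_value : Prop := ∀ (substring : String) (is_start : Bool), Dom_get_text_value substring is_start → Spec_get_text_value substring is_start (get_text_value substring is_start)

-- ===== LEMMAS AND PROOFS =====

-- A's dict lookup as a first-match if-chain over the nine keys
theorem pv_dict_get (k : String) : pvNumberDict.get? k =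
  if "one" = k then some 1 else if "two" = k then some 2 else if "three" = k then some 3 else
  if "four" = k then some 4 else if "five" = k then some 5 else if "six" = k then some 6 else
  if "seven" = k then some 7 else if "eight" = k then some 8 else if "nine" = k then some 9 else none := by
  have e : pvNumberDict = PySem.Dict.mk [("one", 1), ("two", 2), ("three", 3), ("four", 4),
    ("five", 5), ("six", 6), ("seven", 7), ("eight", 8), ("nine", 9)] := by rfl
  rw [e]
  simp only [PySem.Dict.get?]
  by_cases h0 : "one" = k
  · subst h0; rfl
  rw [if_neg h0, List.find?_cons_of_neg (by simp [h0])]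
  by_cases h1 : "two" = k
  · subst h1; rfl
  rw [if_neg h1, List.find?_cons_of_neg (by simp [h1])]
  by_cases h2 : "three" = k
  · subst h2; rfl
  rw [if_neg h2, List.find?_cons_of_neg (by simp [h2])]
  by_cases h3 : "four" = k
  · subst h3; rfl
  rw [if_neg h3, List.find?_cons_of_neg (by simp [h3])]
  by_cases h4 : "five" = k
  · subst h4; rfl
  rw [if_neg h4, List.find?_cons_of_neg (by simp [h4])]
  by_cases h5 : "six" = k
  · subst h5; rfl
  rw [if_neg h5, List.find?_cons_of_neg (by simp [h5])]
  by_cases h6 : "seven" = k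
  · subst h6; rfl
  rw [if_neg h6, List.find?_cons_of_neg (by simp [h6])]
  by_cases h7 : "eight" = k
  · subst h7; rfl
  rw [if_neg h7, List.find?_cons_of_neg (by simp [h7])]
  by_cases h8 : "nine" = k
  · subst h8; rfl
  rw [if_neg h8, List.find?_cons_of_neg (by simp [h8])]
  rfl

-- a word cannot match a longer slice unless it already matches its own-length slice
theorem pv_not_take_long {l w : List Char} {k : Nat} (hk : w.length ≤ k)
    (hw : ¬ (w = l.take w.length)) : (w = l.take k) ↔ False := by
  constructor
  · intro h
    apply hw
    have := congrArg (List.take w.length) h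
    rwa [List.take_take, min_eq_left hk, List.take_length] at this
  · exact False.elim

-- a word cannot equal a slice shorter than itself
theorem pv_not_take_short {l w : List Char} {k : Nat} (hk : k < w.length) : (w = l.take k) ↔ False := by
  constructor
  · intro h
    have := congrArg List.length h
    simp [List.length_take] at this
    omega
  · exact False.elim

theorem pv_rev_cond (w x : List Char) : (w = x.reverse) ↔ (w.reverse = x) := by
  constructor <;> (rintro rfl; simp)

set_option maxHeartbeats 1000000 in
theorem pv_start_case (s : String) :
    (pvAStartLoop s [3, 4, 5]).getD (-1) = pvBScan s true pvNumberWords := by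
  have s3 : ∀ l : List Char, PySem.List.slice l none (some 3) = l.take 3 := fun l => by
    rw [PySem.List.slice_to _ (by norm_num)]; rfl
  have s4 : ∀ l : List Char, PySem.List.slice l none (some 4) = l.take 4 := fun l => by
    rw [PySem.List.slice_to _ (by norm_num)]; rfl
  have s5 : ∀ l : List Char, PySem.List.slice l none (some 5) = l.take 5 := fun l => by
    rw [PySem.List.slice_to _ (by norm_num)]; rfl
  simp only [pvAStartLoop, pvBScan, pvNumberWords, pv_dict_get, if_true]
  simp [String.ext_iff, pysem, List.prefix_iff_eq_take, s3, s4, s5]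
  generalize s.toList = l
  by_cases h1 : ['o','n','e'] = l.take 3
  · obtain ⟨t, rfl⟩ : ∃ t, l = ['o','n','e'] ++ t :=
      ⟨l.drop 3, by conv_lhs => rw [← List.take_append_drop 3 l, ← h1]⟩
    simp
  by_cases h2 : ['t','w','o'] = l.take 3
  · obtain ⟨t, rfl⟩ : ∃ t, l = ['t','w','o'] ++ t :=
      ⟨l.drop 3, by conv_lhs => rw [← List.take_append_drop 3 l, ← h2]⟩
    simp
  by_cases h3 : ['t','h','r','e','e'] = l.take 5
  · obtain ⟨t, rfl⟩ : ∃ t, l = ['t','h','r','e','e'] ++ t :=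
      ⟨l.drop 5, by conv_lhs => rw [← List.take_append_drop 5 l, ← h3]⟩
    simp
  by_cases h4 : ['f','o','u','r'] = l.take 4
  · obtain ⟨t, rfl⟩ : ∃ t, l = ['f','o','u','r'] ++ t :=
      ⟨l.drop 4, by conv_lhs => rw [← List.take_append_drop 4 l, ← h4]⟩
    simp
  by_cases h5 : ['f','i','v','e'] = l.take 4
  · obtain ⟨t, rfl⟩ : ∃ t, l = ['f','i','v','e'] ++ t :=
      ⟨l.drop 4, by conv_lhs => rw [← List.take_append_drop 4 l, ← h5]⟩
    simp
  by_cases h6 : ['s','i','x'] = l.take 3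
  · obtain ⟨t, rfl⟩ : ∃ t, l = ['s','i','x'] ++ t :=
      ⟨l.drop 3, by conv_lhs => rw [← List.take_append_drop 3 l, ← h6]⟩
    simp
  by_cases h7 : ['s','e','v','e','n'] = l.take 5
  · obtain ⟨t, rfl⟩ : ∃ t, l = ['s','e','v','e','n'] ++ t :=
      ⟨l.drop 5, by conv_lhs => rw [← List.take_append_drop 5 l, ← h7]⟩
    simp
  by_cases h8 : ['e','i','g','h','t'] = l.take 5
  · obtain ⟨t, rfl⟩ : ∃ t, l = ['e','i','g','h','t'] ++ t :=
      ⟨l.drop 5, by conv_lhs => rw [← List.take_append_drop 5 l, ← h8]⟩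
    simp
  by_cases h9 : ['n','i','n','e'] = l.take 4
  · obtain ⟨t, rfl⟩ : ∃ t, l = ['n','i','n','e'] ++ t :=
      ⟨l.drop 4, by conv_lhs => rw [← List.take_append_drop 4 l, ← h9]⟩
    simp
  simp_all [pv_not_take_long, pv_not_take_short]

set_option maxHeartbeats 1000000 in
theorem pv_end_case (s : String) :
    (pvAEndLoop s [-3, -4, -5]).getD (-1) = pvBScan s false pvNumberWords := by
  have d3 : ∀ l : List Char, PySem.List.slice l (some (-3)) none = (l.reverse.take 3).reverse :=
    fun l => by rw [PySem.List.slice_from_neg_ofNat l 3 (by norm_num), List.reverse_take]; simp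
  have d4 : ∀ l : List Char, PySem.List.slice l (some (-4)) none = (l.reverse.take 4).reverse :=
    fun l => by rw [PySem.List.slice_from_neg_ofNat l 4 (by norm_num), List.reverse_take]; simp
  have d5 : ∀ l : List Char, PySem.List.slice l (some (-5)) none = (l.reverse.take 5).reverse :=
    fun l => by rw [PySem.List.slice_from_neg_ofNat l 5 (by norm_num), List.reverse_take]; simp
  simp only [pvAEndLoop, pvBScan, pvNumberWords, pv_dict_get]
  simp [String.ext_iff, pysem, PySem.Chars.endswith_iff, ← List.reverse_prefix,
    List.prefix_iff_eq_take, d3, d4, d5, pv_rev_cond]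
  generalize s.toList.reverse = r
  by_cases h1 : ['e','n','o'] = r.take 3
  · obtain ⟨t, rfl⟩ : ∃ t, r = ['e','n','o'] ++ t :=
      ⟨r.drop 3, by conv_lhs => rw [← List.take_append_drop 3 r, ← h1]⟩
    simp
  by_cases h2 : ['o','w','t'] = r.take 3
  · obtain ⟨t, rfl⟩ : ∃ t, r = ['o','w','t'] ++ t :=
      ⟨r.drop 3, by conv_lhs => rw [← List.take_append_drop 3 r, ← h2]⟩
    simp
  by_cases h3 : ['e','e','r','h','t'] = r.take 5
  · obtain ⟨t, rfl⟩ : ∃ t, r = ['e','e','r','h','t'] ++ t :=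
      ⟨r.drop 5, by conv_lhs => rw [← List.take_append_drop 5 r, ← h3]⟩
    simp
  by_cases h4 : ['r','u','o','f'] = r.take 4
  · obtain ⟨t, rfl⟩ : ∃ t, r = ['r','u','o','f'] ++ t :=
      ⟨r.drop 4, by conv_lhs => rw [← List.take_append_drop 4 r, ← h4]⟩
    simp
  by_cases h5 : ['e','v','i','f'] = r.take 4
  · obtain ⟨t, rfl⟩ : ∃ t, r = ['e','v','i','f'] ++ t :=
      ⟨r.drop 4, by conv_lhs => rw [← List.take_append_drop 4 r, ← h5]⟩
    simp
  by_cases h6 : ['x','i','s'] = r.take 3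
  · obtain ⟨t, rfl⟩ : ∃ t, r = ['x','i','s'] ++ t :=
      ⟨r.drop 3, by conv_lhs => rw [← List.take_append_drop 3 r, ← h6]⟩
    simp
  by_cases h7 : ['n','e','v','e','s'] = r.take 5
  · obtain ⟨t, rfl⟩ : ∃ t, r = ['n','e','v','e','s'] ++ t :=
      ⟨r.drop 5, by conv_lhs => rw [← List.take_append_drop 5 r, ← h7]⟩
    simp
  by_cases h8 : ['t','h','g','i','e'] = r.take 5
  · obtain ⟨t, rfl⟩ : ∃ t, r = ['t','h','g','i','e'] ++ t :=
      ⟨r.drop 5, by conv_lhs => rw [← List.take_append_drop 5 r, ← h8]⟩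
    simp
  by_cases h9 : ['e','n','i','n'] = r.take 4
  · obtain ⟨t, rfl⟩ : ∃ t, r = ['e','n','i','n'] ++ t :=
      ⟨r.drop 4, by conv_lhs => rw [← List.take_append_drop 4 r, ← h9]⟩
    simp
  simp_all [pv_not_take_long, pv_not_take_short]

theorem pv_main (s : String) (b : Bool) : get_text_value s b = get_text_value_alt s b := by
  cases b
  · exact pv_end_case s
  · exact pv_start_case s

-- ===== VERDICT (by name: the statement is the Claim_ definition above) =====
theorem get_text_value_spec : Claim_equal_get_text_value := by
  intro s b _
  unfold Spec_get_text_value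
  exact pv_main s b
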